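-- pv_equiv track=rewrite | github.com/su6i/amir-cli | lib/python/subtitle/cli.py | _parse_sub_lang_tokens
-- ===== SOURCE A (Python) =====
-- from typing import Dict, List, Optional, Tuple
--
-- def _parse_sub_lang_tokens(tokens: List[str]) -> Tuple[List[str], Dict[str, int]]:
--     """Parse --sub tokens supporting inline size per language.
--
--     Examples:
--       --sub en fa            -> langs=['en','fa'], sizes={}
--       --sub en 18 fa 20      -> langs=['en','fa'], sizes={'en':18,'fa':20}
--       --sub fa 22            -> langs=['fa'],      sizes={'fa':22}
--     """
--     langs: List[str] = []
--     sizes: Dict[str, int] = {}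
--
--     i = 0
--     while i < len(tokens):
--         tok = str(tokens[i]).strip()
--         if not tok:
--             i += 1
--             continue
--
--         if tok.isdigit():
--             raise ValueError(f"Unexpected size token '{tok}' without a preceding language in --sub")
--
--         lang = tok.lower()
--         langs.append(lang)
--
--         if i + 1 < len(tokens):
--             nxt = str(tokens[i + 1]).strip()
--             if nxt.isdigit():
--                 sz = int(nxt)
--                 if sz <= 0:
--                     raise ValueError(f"Invalid font size '{nxt}' for language '{lang}'")
--                 sizes[lang] = sz
--                 i += 2
--                 continue
--
--         i += 1
--
--     if not langs:
--         langs = ['en', 'fa']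
--
--     return langs, sizes
-- ===== SOURCE B (Python) =====
-- from typing import Dict, List, Tuple
--
-- def _parse_sub_lang_tokens(tokens: List[str]) -> Tuple[List[str], Dict[str, int]]:
--     """Single forward pass carrying the previously seen language instead of a
--     while-loop with index lookahead."""
--     langs: List[str] = []
--     sizes: Dict[str, int] = {}
--     prev_lang = None  # language token seen immediately before, if any
--     for tok in tokens:
--         s = str(tok).strip()
--         if not s:
--             prev_lang = None
--             continue
--         if s.isdigit():
--             if prev_lang is None:
--                 raise ValueError(f"Unexpected size token '{s}' without a preceding language in --sub")
--             sz = int(s)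
--             if sz <= 0:
--                 raise ValueError(f"Invalid font size '{s}' for language '{prev_lang}'")
--             sizes[prev_lang] = sz
--             prev_lang = None
--         else:
--             lang = s.lower()
--             langs.append(lang)
--             prev_lang = lang
--     if not langs:
--         langs = ['en', 'fa']
--     return langs, sizes
-- ===== Notes on version B (the rewrite author's own statement) =====
-- stated objective: simpler
-- what changed: Replaced the index-based while loop with i+=1/i+=2 lookahead by a single for-loop over the tokens that carries the immediately preceding language as state, associating a digit token with that carried language.
import Mathlib
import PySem

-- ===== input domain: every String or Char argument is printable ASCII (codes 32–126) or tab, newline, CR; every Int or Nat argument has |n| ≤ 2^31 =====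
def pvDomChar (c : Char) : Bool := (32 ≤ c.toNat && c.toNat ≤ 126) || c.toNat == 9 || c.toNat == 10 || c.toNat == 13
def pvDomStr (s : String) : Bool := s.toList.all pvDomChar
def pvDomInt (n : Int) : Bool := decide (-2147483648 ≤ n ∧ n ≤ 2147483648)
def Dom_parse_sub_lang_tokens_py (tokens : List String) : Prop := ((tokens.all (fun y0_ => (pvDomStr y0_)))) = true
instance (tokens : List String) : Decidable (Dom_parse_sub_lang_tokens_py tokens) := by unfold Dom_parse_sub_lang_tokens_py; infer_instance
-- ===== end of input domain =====

-- B rewrites A's index-based while loop with lookahead as a single forward fold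
-- carrying the immediately preceding language as state (objective: simpler).

-- ===== PORT A =====
-- While loop over index i; on the Python's `raise ValueError` branches the port
-- returns the current state (those inputs are excluded by Pre_).
def pvGoA (tokens : List String) (i : Nat) (langs : List String)
    (sizes : PySem.Dict String Int) : List String × (List (String × Int)) :=
  if h : i < tokens.length then
    let tok := PySem.Chars.strip (tokens[i]).toList
    if tok = [] then
      pvGoA tokens (i + 1) langs sizes
    else if PySem.Chars.strIsdigit tok then
      (langs, sizes.items)  -- Python: raise ValueError (unexpected size token)
    else
      let lang := String.ofList (PySem.Chars.lower tok)
      let langs' := langs ++ [lang]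
      if h2 : i + 1 < tokens.length then
        let nxt := PySem.Chars.strip (tokens[i + 1]).toList
        if PySem.Chars.strIsdigit nxt then
          let sz := (PySem.Int.ofChars? nxt).getD 0
          if sz ≤ 0 then (langs', sizes.items)  -- Python: raise ValueError (invalid size)
          else pvGoA tokens (i + 2) langs' (sizes.insert lang sz)
        else pvGoA tokens (i + 1) langs' sizes
      else pvGoA tokens (i + 1) langs' sizes
  else
    ((if langs = [] then ["en", "fa"] else langs), sizes.items)
termination_by tokens.length - i

def parse_sub_lang_tokens_py (tokens : List String) : List String × (List (String × Int)) :=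
  pvGoA tokens 0 [] PySem.Dict.empty

-- ===== PORT B =====
-- One step of B's for-loop; state = (langs, sizes, previously-seen language).
def pvStepB (st : List String × PySem.Dict String Int × Option String) (tok : String) :
    List String × PySem.Dict String Int × Option String :=
  let s := PySem.Chars.strip tok.toList
  if s = [] then (st.1, st.2.1, none)
  else if PySem.Chars.strIsdigit s then
    match st.2.2 with
    | none => st  -- Python: raise ValueError (unexpected size token)
    | some lang =>
      let sz := (PySem.Int.ofChars? s).getD 0
      if sz ≤ 0 then st  -- Python: raise ValueError (invalid size)
      else (st.1, st.2.1.insert lang sz, none)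
  else
    let lang := String.ofList (PySem.Chars.lower s)
    (st.1 ++ [lang], st.2.1, some lang)

def pvFinishB (st : List String × PySem.Dict String Int × Option String) :
    List String × (List (String × Int)) :=
  ((if st.1 = [] then ["en", "fa"] else st.1), st.2.1.items)

def parse_sub_lang_tokens_py_alt (tokens : List String) : List String × (List (String × Int)) :=
  pvFinishB (tokens.foldl pvStepB ([], PySem.Dict.empty, none))

-- ===== PRECONDITION & SPEC =====
-- Pre_ excludes exactly the inputs on which the Python A raises ValueError:
-- a digit token at position 0, after an empty-after-strip token, after another
-- digit token, or whose value is ≤ 0.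
def Pre_parse_sub_lang_tokens_py (tokens : List String) : Prop :=
  ∀ (i : Nat) (h : i < tokens.length),
    PySem.Chars.strIsdigit (PySem.Chars.strip (tokens[i]).toList) →
      0 < i ∧
      (∀ (h' : i - 1 < tokens.length),
        PySem.Chars.strip (tokens[i - 1]).toList ≠ [] ∧
        ¬ PySem.Chars.strIsdigit (PySem.Chars.strip (tokens[i - 1]).toList)) ∧
      0 < (PySem.Int.ofChars? (PySem.Chars.strip (tokens[i]).toList)).getD 0

instance (tokens : List String) : Decidable (Pre_parse_sub_lang_tokens_py tokens) := by
  unfold Pre_parse_sub_lang_tokens_py; infer_instance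

def pvWitness_parse_sub_lang_tokens_py : List String := ["En", " 18 ", "", "fa"]

def Spec_parse_sub_lang_tokens_py (tokens : List String) (out : List String × (List (String × Int))) : Prop :=
  out = parse_sub_lang_tokens_py_alt tokens
instance (tokens : List String) (out : List String × (List (String × Int))) :
    Decidable (Spec_parse_sub_lang_tokens_py tokens out) := by
  unfold Spec_parse_sub_lang_tokens_py; infer_instance

-- ===== CLAIM (what is proved, stated in full; the proofs are below) =====
def Claim_equal_parse_sub_lang_tokens_py : Prop :=
  ∀ (tokens : List String), Dom_parse_sub_lang_tokens_py tokens →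
    Pre_parse_sub_lang_tokens_py tokens →
    Spec_parse_sub_lang_tokens_py tokens (parse_sub_lang_tokens_py tokens)

-- ===== LEMMAS AND PROOFS =====

theorem pvIsdigit_ne_nil (s : List Char) (h : PySem.Chars.strIsdigit s = true) : s ≠ [] := by
  intro hn; subst hn; simp [PySem.Chars.strIsdigit] at h

theorem pvStepB_empty (ls : List String) (d : PySem.Dict String Int) (p : Option String)
    (tok : String) (h : PySem.Chars.strip tok.toList = []) :
    pvStepB (ls, d, p) tok = (ls, d, none) := by
  simp [pvStepB, h]

theorem pvStepB_lang (ls : List String) (d : PySem.Dict String Int) (p : Option String)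
    (tok : String) (h1 : ¬ PySem.Chars.strip tok.toList = [])
    (h2 : ¬ PySem.Chars.strIsdigit (PySem.Chars.strip tok.toList) = true) :
    pvStepB (ls, d, p) tok =
      (ls ++ [String.ofList (PySem.Chars.lower (PySem.Chars.strip tok.toList))], d,
        some (String.ofList (PySem.Chars.lower (PySem.Chars.strip tok.toList)))) := by
  simp [pvStepB, h1, h2]

theorem pvStepB_digit (ls : List String) (d : PySem.Dict String Int) (lang : String)
    (tok : String) (h1 : PySem.Chars.strIsdigit (PySem.Chars.strip tok.toList) = true)
    (h2 : ¬ (PySem.Int.ofChars? (PySem.Chars.strip tok.toList)).getD 0 ≤ 0) :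
    pvStepB (ls, d, some lang) tok =
      (ls, d.insert lang ((PySem.Int.ofChars? (PySem.Chars.strip tok.toList)).getD 0), none) := by
  have hne := pvIsdigit_ne_nil _ h1
  simp [pvStepB, hne, h1, h2]

-- pvFinishB ignores the carried previous-language component whenever the first
-- remaining token is not a (nonempty) digit token.
theorem pvFinishB_foldl_prev_irrel (l : List String) (langs : List String)
    (sizes : PySem.Dict String Int) (p q : Option String)
    (h : ∀ t ∈ l.head?, ¬ (PySem.Chars.strip t.toList ≠ [] ∧
          PySem.Chars.strIsdigit (PySem.Chars.strip t.toList) = true)) :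
    pvFinishB (l.foldl pvStepB (langs, sizes, p)) =
      pvFinishB (l.foldl pvStepB (langs, sizes, q)) := by
  cases l with
  | nil => rfl
  | cons t rest =>
    have ht := h t (by simp)
    by_cases he : PySem.Chars.strip t.toList = []
    · rw [List.foldl_cons, List.foldl_cons, pvStepB_empty _ _ _ _ he, pvStepB_empty _ _ _ _ he]
    · have hd : ¬ PySem.Chars.strIsdigit (PySem.Chars.strip t.toList) = true := by
        intro hdig; exact ht ⟨he, hdig⟩
      rw [List.foldl_cons, List.foldl_cons, pvStepB_lang _ _ _ _ he hd, pvStepB_lang _ _ _ _ he hd]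

theorem pvGoA_eq_foldB (tokens : List String) (i : Nat) (langs : List String)
    (sizes : PySem.Dict String Int)
    (hpre : Pre_parse_sub_lang_tokens_py tokens)
    (hsafe : ∀ (h : i < tokens.length),
      ¬ PySem.Chars.strIsdigit (PySem.Chars.strip (tokens[i]).toList) = true) :
    pvGoA tokens i langs sizes =
      pvFinishB ((tokens.drop i).foldl pvStepB (langs, sizes, none)) := by
  fun_induction pvGoA tokens i langs sizes with
  | case1 i langs sizes h tok hemp ih =>
    -- empty token: skip
    rw [List.drop_eq_getElem_cons h, List.foldl_cons, pvStepB_empty _ _ _ _ hemp]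
    exact ih (by
      intro h' hdig
      obtain ⟨hp, hprev, _⟩ := hpre (i + 1) h' hdig
      have := hprev (by omega)
      simp only [Nat.add_sub_cancel] at this
      exact this.1 hemp)
  | case2 i langs sizes h tok hemp hdig =>
    -- digit token reached: impossible under hsafe
    exact absurd hdig (hsafe h)
  | case3 i langs sizes h tok hemp hdig lang langs' h2 nxt hnd sz hle =>
    -- size <= 0: impossible under Pre_
    have hpos := (hpre (i + 1) h2 hnd).2.2
    exact absurd hpos (not_lt.mpr hle)
  | case4 i langs sizes h tok hemp hdig lang langs' h2 nxt hnd sz hle ih =>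
    -- language followed by a positive size: consume two tokens
    rw [List.drop_eq_getElem_cons h, List.foldl_cons, pvStepB_lang _ _ _ _ hemp hdig,
      List.drop_eq_getElem_cons h2, List.foldl_cons, pvStepB_digit _ _ _ _ hnd hle]
    exact ih (by
      intro h' hdig'
      obtain ⟨hp, hprev, _⟩ := hpre (i + 2) h' hdig'
      have := hprev (by omega)
      exact this.2 hnd)
  | case5 i langs sizes h tok hemp hdig lang langs' h2 nxt hnd ih =>
    -- language, next token present but not a digit
    rw [List.drop_eq_getElem_cons h, List.foldl_cons, pvStepB_lang _ _ _ _ hemp hdig,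
      pvFinishB_foldl_prev_irrel _ _ _
        (some (String.ofList (PySem.Chars.lower (PySem.Chars.strip (tokens[i]).toList)))) none
        (by
          intro t ht hcontra
          rw [List.head?_drop, List.getElem?_eq_getElem h2, Option.mem_some_iff] at ht
          subst ht
          exact hnd hcontra.2)]
    exact ih (by intro h' hdig'; exact hnd hdig')
  | case6 i langs sizes h tok hemp hdig lang langs' h2 ih =>
    -- language, no next token
    rw [List.drop_eq_getElem_cons h, List.foldl_cons, pvStepB_lang _ _ _ _ hemp hdig,
      ih (by intro h'; exact absurd h' h2),
      List.drop_eq_nil_iff.mpr (by omega : tokens.length ≤ i + 1)]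
    rfl
  | case7 i langs sizes h =>
    -- past the end
    rw [List.drop_eq_nil_iff.mpr (by omega)]
    rfl

-- ===== VERDICT (by name: the statement is the Claim_ definition above) =====
theorem parse_sub_lang_tokens_py_spec : Claim_equal_parse_sub_lang_tokens_py := by
  intro tokens _hdom hpre
  unfold Spec_parse_sub_lang_tokens_py parse_sub_lang_tokens_py parse_sub_lang_tokens_py_alt
  rw [pvGoA_eq_foldB tokens 0 [] PySem.Dict.empty hpre (by
    intro h hdig
    obtain ⟨hp, _, _⟩ := hpre 0 h hdig
    omega)]
  rfl
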